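-- pv_equiv track=rewrite | github.com/jorgearanda/morsels | format_ranges/format_ranges.py | peel_lowest_range
-- ===== SOURCE A (Python) =====
-- def peel_lowest_range(seq):
--     low = min(seq)
--     hi = low
--     seq.pop(seq.index(low))
--     while True:
--         if len(seq) == 0:
--             break
--         next = min(seq)
--         if next == hi + 1:
--             hi = next
--             seq.pop(seq.index(hi))
--         else:
--             break
--
--     if low == hi:
--         return seq, f"{low}"
--     else:
--         return seq, f"{low}-{hi}"
-- ===== SOURCE B (Python) =====
-- def peel_lowest_range(seq):
--     # Return-value-equivalent re-implementation; like A it leaves seq holding the remainder.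
--     s = sorted(seq)
--     low = s[0]
--     hi = low
--     for v in s[1:]:
--         if v == hi + 1:
--             hi = v
--         else:
--             break
--     to_remove = set(range(low, hi + 1))
--     kept = []
--     for x in seq:
--         if x in to_remove:
--             to_remove.discard(x)
--         else:
--             kept.append(x)
--     seq[:] = kept
--     if low == hi:
--         return seq, f"{low}"
--     else:
--         return seq, f"{low}-{hi}"
-- ===== Notes on version B (the rewrite author's own statement) =====
-- stated objective: alternative
-- what changed: B sorts once and walks the sorted list to find hi (stopping on duplicates), then removes the peeled values {low..hi} in a single set-driven pass, instead of A's repeated min/index/pop scans per peeled value.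
-- outside the precondition, e.g. on peel_lowest_range([]): A raises ValueError, B raises IndexError
import Mathlib
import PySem

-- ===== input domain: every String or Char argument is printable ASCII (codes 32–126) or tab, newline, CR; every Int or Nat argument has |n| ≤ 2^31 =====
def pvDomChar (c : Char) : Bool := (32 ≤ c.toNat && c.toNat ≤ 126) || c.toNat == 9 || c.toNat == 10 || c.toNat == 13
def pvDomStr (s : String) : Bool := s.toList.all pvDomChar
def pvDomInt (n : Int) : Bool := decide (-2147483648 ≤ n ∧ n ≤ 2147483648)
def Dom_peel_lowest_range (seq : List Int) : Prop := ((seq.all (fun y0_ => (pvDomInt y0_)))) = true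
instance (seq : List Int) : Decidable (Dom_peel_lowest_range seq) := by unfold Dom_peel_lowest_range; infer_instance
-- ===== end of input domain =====

-- B replaces A's repeated min/index/pop scans by one sort, an ascending walk to find hi, and a
-- single set-driven pass removing the peeled values; equivalence is about the RETURN value
-- (both Pythons leave the remainder in seq: A by pops, B by seq[:] = kept).

-- ===== PORT A =====
-- seq.pop(seq.index(v)) : remove the first occurrence of v (v is present whenever A executes this)
def popAt (seq : List Int) (v : Int) : List Int :=
  match PySem.List.index? seq v with
  | none => seq
  | some i =>
    match PySem.List.pop? seq (i : Int) with
    | none => seq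
    | some r => r.2

-- the 'while True' loop; each iteration that continues removes one element, so fuel = length suffices
def peelLoopA : Nat → List Int → Int → List Int × Int
  | 0, seq, hi => (seq, hi)
  | fuel + 1, seq, hi =>
    if seq.length = 0 then (seq, hi)
    else
      match PySem.List.min? seq (fun x => x) with
      | none => (seq, hi)
      | some next =>
        if next = hi + 1 then peelLoopA fuel (popAt seq next) next
        else (seq, hi)

def peel_lowest_range (seq : List Int) : List Int × String :=
  match PySem.List.min? seq (fun x => x) with
  | none => ([], "")  -- min([]) raises ValueError; excluded by Pre_
  | some low =>
    let seq1 := popAt seq low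
    let r := peelLoopA seq1.length seq1 low
    if low = r.2 then (r.1, PySem.Int.toStr low)
    else (r.1, PySem.Int.toStr low ++ "-" ++ PySem.Int.toStr r.2)

-- ===== PORT B =====
-- the 'for v in s[1:] … break' walk
def walkB : List Int → Int → Int
  | [], hi => hi
  | v :: t, hi => if v = hi + 1 then walkB t v else hi

-- the single pass: keep x unless it is in the to-remove set, discarding each matched value once
def keepLoop : List Int → PySem.Set Int → List Int
  | [], _ => []
  | x :: t, s =>
    if PySem.Set.contains s x then keepLoop t (PySem.Set.discard s x)
    else x :: keepLoop t s

def peel_lowest_range_alt (seq : List Int) : List Int × String :=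
  let s := PySem.List.sorted seq (fun x => x)
  match PySem.List.pyGet? s 0 with
  | none => ([], "")  -- s[0] raises IndexError on empty input; excluded by Pre_
  | some low =>
    let hi := walkB (PySem.List.slice s (some 1) none) low
    let kept := keepLoop seq (PySem.Set.ofList (PySem.List.pyRange low (hi + 1)))
    if low = hi then (kept, PySem.Int.toStr low)
    else (kept, PySem.Int.toStr low ++ "-" ++ PySem.Int.toStr hi)

-- ===== PRECONDITION & SPEC =====
-- A raises ValueError (min of empty sequence) on []; that is all Pre_ excludes.
def Pre_peel_lowest_range (seq : List Int) : Prop := seq ≠ []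
instance (seq : List Int) : Decidable (Pre_peel_lowest_range seq) := by
  unfold Pre_peel_lowest_range; infer_instance

def pvWitness_peel_lowest_range : List Int := [3, 1, 2, 7, 1]

def Spec_peel_lowest_range (seq : List Int) (out : List Int × String) : Prop := out = peel_lowest_range_alt seq
instance (seq : List Int) (out : List Int × String) : Decidable (Spec_peel_lowest_range seq out) := by unfold Spec_peel_lowest_range; infer_instance

-- ===== CLAIM (what is proved, stated in full; the proofs are below) =====
def Claim_equal_peel_lowest_range : Prop := ∀ (seq : List Int), Dom_peel_lowest_range seq → Pre_peel_lowest_range seq → Spec_peel_lowest_range seq (peel_lowest_range seq)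

-- ===== LEMMAS AND PROOFS =====

-- the values A's loop consumes, read off the sorted remainder
def consumed : List Int → Int → List Int
  | [], _ => []
  | v :: t, hi => if v = hi + 1 then v :: consumed t v else []

-- erase the first occurrence of each listed value
def eraseEach (l : List Int) (vs : List Int) : List Int := vs.foldl List.erase l

lemma popAt_eq_erase (seq : List Int) (v : Int) (h : v ∈ seq) :
    popAt seq v = seq.erase v := by
  have h1 : (PySem.List.index? seq v).isSome := (PySem.List.index?_isSome_iff seq v).mpr h
  obtain ⟨k, hk⟩ := Option.isSome_iff_exists.mp h1
  obtain ⟨hlt, -, -⟩ := PySem.List.getElem_of_index?_eq_some hk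
  unfold popAt
  rw [hk]
  show (match PySem.List.pop? seq (k : Int) with
        | none => seq
        | some r => r.2) = seq.erase v
  rw [PySem.List.pop?_natCast seq k hlt]
  show seq.eraseIdx k = seq.erase v
  rw [List.erase_eq_eraseIdx]
  have hidx : List.idxOf? v seq = some k := by
    rw [← PySem.List.index?_eq_idxOf?]; exact hk
  rw [hidx]

lemma min?_eq_head_sorted (l : List Int) (m : Int) (t : List Int)
    (h : PySem.List.sorted l (fun x => x) = m :: t) :
    PySem.List.min? l (fun x => x) = some m := by
  have hm : m ∈ l := by
    rw [← PySem.List.mem_sorted l (fun x => x) false, h]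
    exact List.mem_cons_self
  cases hmin : PySem.List.min? l (fun x => x) with
  | none =>
    have : l = [] := (PySem.List.min?_eq_none_iff l (fun x => x)).mp hmin
    subst this; simp at hm
  | some m' =>
    have h1 : m' ≤ m := PySem.List.min?_isMin hmin m hm
    have h2 : m ≤ m' := PySem.List.key_head_sorted_le l (fun x => x) h m' (PySem.List.min?_mem hmin)
    have : m' = m := le_antisymm h1 h2
    rw [this]

lemma sorted_erase (l : List Int) (m : Int) (t : List Int)
    (h : PySem.List.sorted l (fun x => x) = m :: t) :
    PySem.List.sorted (l.erase m) (fun x => x) = t := by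
  apply PySem.List.sorted_id_eq_of_perm_of_pairwise
  · have hp : (m :: t).Perm l := h ▸ PySem.List.sorted_perm l (fun x => x) false
    have := hp.erase m
    simpa using this
  · have := h ▸ PySem.List.sorted_pairwise l (fun x => x)
    exact (List.pairwise_cons.mp this).2

lemma le_walkB : ∀ (s : List Int) (hi : Int), hi ≤ walkB s hi := by
  intro s
  induction s with
  | nil => intro hi; simp [walkB]
  | cons v t ih =>
    intro hi
    simp only [walkB]
    split
    · have := ih v; omega
    · omega

lemma consumed_eq_range : ∀ (s : List Int) (hi : Int),
    consumed s hi = PySem.List.pyRange (hi + 1) (walkB s hi + 1) := by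
  intro s
  induction s with
  | nil => intro hi; simp [consumed, walkB, PySem.List.pyRange_one_eq_nil]
  | cons v t ih =>
    intro hi
    by_cases hv : v = hi + 1
    · subst hv
      have hle : hi + 1 ≤ walkB t (hi + 1) := le_walkB t (hi + 1)
      have hw : walkB ((hi + 1) :: t) hi = walkB t (hi + 1) := by simp [walkB]
      have hcon : consumed ((hi + 1) :: t) hi = (hi + 1) :: consumed t (hi + 1) := by
        simp [consumed]
      rw [hw, hcon, ih (hi + 1),
        PySem.List.pyRange_one_cons (show hi + 1 < walkB t (hi + 1) + 1 by omega)]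
    · simp [consumed, walkB, hv, PySem.List.pyRange_one_eq_nil]

lemma loop_char : ∀ (fuel : Nat) (l : List Int) (hi : Int), l.length ≤ fuel →
    peelLoopA fuel l hi =
      (eraseEach l (consumed (PySem.List.sorted l (fun x => x)) hi),
       walkB (PySem.List.sorted l (fun x => x)) hi) := by
  intro fuel
  induction fuel with
  | zero =>
    intro l hi hlen
    have : l = [] := List.length_eq_zero_iff.mp (Nat.le_zero.mp hlen)
    subst this
    simp [peelLoopA, PySem.List.sorted, consumed, walkB, eraseEach]
  | succ n ih =>
    intro l hi hlen
    by_cases hl : l.length = 0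
    · have : l = [] := List.length_eq_zero_iff.mp hl
      subst this
      simp [peelLoopA, PySem.List.sorted, consumed, walkB, eraseEach]
    · have hlne : l ≠ [] := by
        intro h; subst h; simp at hl
      cases hs : PySem.List.sorted l (fun x => x) with
      | nil => exact absurd ((PySem.List.sorted_eq_nil_iff l _ false).mp hs) hlne
      | cons m t =>
        have hmin := min?_eq_head_sorted l m t hs
        have hm : m ∈ l := by
          rw [← PySem.List.mem_sorted l (fun x => x) false, hs]
          exact List.mem_cons_self
        simp only [peelLoopA, if_neg hl, hmin]
        by_cases hnext : m = hi + 1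
        · rw [if_pos hnext, popAt_eq_erase l m hm]
          have hlen' : (l.erase m).length ≤ n := by
            rw [List.length_erase_of_mem hm]; omega
          rw [ih (l.erase m) m hlen', sorted_erase l m t hs]
          simp only [consumed, if_pos hnext, walkB]
          rfl
        · rw [if_neg hnext]
          simp [consumed, walkB, hnext, eraseEach]

lemma eraseEach_nil : ∀ (vs : List Int), eraseEach [] vs = [] := by
  intro vs
  induction vs with
  | nil => rfl
  | cons v t ih => simpa [eraseEach, List.foldl] using ih

lemma eraseEach_cons (x : Int) : ∀ (vs l : List Int), vs.Nodup →
    eraseEach (x :: l) vs =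
      if x ∈ vs then eraseEach l (vs.erase x) else x :: eraseEach l vs := by
  intro vs
  induction vs with
  | nil => intro l _; simp [eraseEach]
  | cons v t ih =>
    intro l hnd
    have hndt : t.Nodup := (List.nodup_cons.mp hnd).2
    by_cases hvx : v = x
    · subst hvx
      rw [if_pos List.mem_cons_self]
      show eraseEach ((v :: l).erase v) t = eraseEach l ((v :: t).erase v)
      rw [List.erase_cons_head, List.erase_cons_head]
    · have h1 : (x :: l).erase v = x :: l.erase v :=
        List.erase_cons_tail (by simp; omega)
      show eraseEach ((x :: l).erase v) t = _
      rw [h1, ih (l.erase v) hndt]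
      by_cases hxt : x ∈ t
      · have hmem : x ∈ v :: t := List.mem_cons_of_mem v hxt
        rw [if_pos hxt, if_pos hmem]
        have h2 : (v :: t).erase x = v :: t.erase x :=
          List.erase_cons_tail (by simp; omega)
        rw [h2]
        rfl
      · have hmem : x ∉ v :: t := by
          simp [hxt]; omega
        rw [if_neg hxt, if_neg hmem]
        rfl

lemma discard_eq_erase (s : List Int) (x : Int) (h : s.Nodup) :
    PySem.Set.discard s x = s.erase x := by
  rw [PySem.Set.discard, List.Nodup.erase_eq_filter h x]
  simp [bne]

lemma keep_eq_eraseEach : ∀ (l s : List Int), s.Nodup →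
    keepLoop l s = eraseEach l s := by
  intro l
  induction l with
  | nil => intro s _; rw [eraseEach_nil]; rfl
  | cons x t ih =>
    intro s hnd
    have hc : PySem.Set.contains s x = true ↔ x ∈ s := by
      simp [PySem.Set.contains]
    rw [eraseEach_cons x s t hnd]
    by_cases hx : x ∈ s
    · show (if PySem.Set.contains s x then keepLoop t (PySem.Set.discard s x)
            else x :: keepLoop t s) = _
      rw [if_pos (hc.mpr hx), if_pos hx, discard_eq_erase s x hnd,
        ih (s.erase x) (hnd.erase x)]
    · show (if PySem.Set.contains s x then keepLoop t (PySem.Set.discard s x)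
            else x :: keepLoop t s) = _
      rw [if_neg (by simp [PySem.Set.contains, hx]), if_neg hx, ih s hnd]

lemma ofList_aux : ∀ (xs s : List Int), (∀ x ∈ xs, x ∉ s) → xs.Nodup →
    xs.foldl PySem.Set.add s = s ++ xs := by
  intro xs
  induction xs with
  | nil => intro s _ _; simp
  | cons x t ih =>
    intro s hdisj hnd
    have hxs : x ∉ s := hdisj x List.mem_cons_self
    have hadd : PySem.Set.add s x = s ++ [x] := by
      rw [PySem.Set.add, if_neg (by simp [PySem.Set.contains, hxs])]
    show t.foldl PySem.Set.add (PySem.Set.add s x) = s ++ x :: t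
    rw [hadd, ih (s ++ [x])
      (by
        intro y hy
        simp only [List.mem_append, List.mem_singleton]
        have h1 : y ∉ s := hdisj y (List.mem_cons_of_mem x hy)
        have h2 : y ≠ x := by
          intro h; subst h; exact (List.nodup_cons.mp hnd).1 hy
        tauto)
      (List.nodup_cons.mp hnd).2]
    simp

lemma ofList_self (xs : List Int) (h : xs.Nodup) : PySem.Set.ofList xs = xs := by
  show xs.foldl PySem.Set.add [] = xs
  rw [ofList_aux xs [] (by simp) h]
  rfl

-- ===== VERDICT (by name: the statement is the Claim_ definition above) =====
theorem peel_lowest_range_spec : Claim_equal_peel_lowest_range := by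
  intro seq _ hpre
  unfold Spec_peel_lowest_range
  cases hs : PySem.List.sorted seq (fun x => x) with
  | nil => exact absurd ((PySem.List.sorted_eq_nil_iff seq _ false).mp hs) hpre
  | cons low t =>
    have hmin := min?_eq_head_sorted seq low t hs
    have hlow : low ∈ seq := by
      rw [← PySem.List.mem_sorted seq (fun x => x) false, hs]
      exact List.mem_cons_self
    have hhi : low ≤ walkB t low := le_walkB t low
    unfold peel_lowest_range peel_lowest_range_alt
    simp only [hmin, hs, PySem.List.pyGet?_zero_cons, PySem.List.slice_from_one,
      List.tail_cons]
    rw [popAt_eq_erase seq low hlow,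
      loop_char (seq.erase low).length (seq.erase low) low le_rfl,
      sorted_erase seq low t hs]
    have hnd : (PySem.List.pyRange low (walkB t low + 1)).Nodup :=
      PySem.List.nodup_pyRange_one low (walkB t low + 1)
    rw [ofList_self _ hnd, keep_eq_eraseEach seq _ hnd]
    have hrem : eraseEach (seq.erase low) (consumed t low) =
        eraseEach seq (PySem.List.pyRange low (walkB t low + 1)) := by
      rw [consumed_eq_range,
        PySem.List.pyRange_one_cons (show low < walkB t low + 1 by omega)]
      rfl
    rw [hrem]
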